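-- pv_equiv track=rewrite | github.com/wsekete/pdf-form-enrichment-tool | pdf_form_editor/naming/preservation_generator.py | _blocks_are_similar
-- ===== SOURCE A (Python) =====
-- def _blocks_are_similar(block1: str, block2: str) -> bool:
--     """Check if two blocks are semantically similar."""
--     similar_blocks = [
--         {'owner-information', 'applicant-information', 'insured-information'},
--         {'beneficiary-information', 'recipient-information'},
--         {'contact-information', 'address-information'},
--         {'payment', 'billing', 'premium'},
--     ]
--
--     for group in similar_blocks:
--         if block1 in group and block2 in group:
--             return True
--
--     return False
-- ===== SOURCE B (Python) =====
-- _SIMILAR_PAIRS = frozenset(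
--     (x, y)
--     for group in (
--         ('owner-information', 'applicant-information', 'insured-information'),
--         ('beneficiary-information', 'recipient-information'),
--         ('contact-information', 'address-information'),
--         ('payment', 'billing', 'premium'),
--     )
--     for x in group
--     for y in group
-- )
--
--
-- def _blocks_are_similar(block1: str, block2: str) -> bool:
--     """Check if two blocks are semantically similar: one membership test of the
--     ordered pair in the precomputed similarity relation (all within-group pairs)."""
--     return (block1, block2) in _SIMILAR_PAIRS
-- ===== Notes on version B (the rewrite author's own statement) =====
-- stated objective: alternative
-- what changed: Instead of scanning the list of groups and testing both names against each group, B precomputes the full similarity relation (the set of all ordered within-group name pairs) once and the function is a single membership test of the pair (block1, block2) in that relation.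
import Mathlib
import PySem

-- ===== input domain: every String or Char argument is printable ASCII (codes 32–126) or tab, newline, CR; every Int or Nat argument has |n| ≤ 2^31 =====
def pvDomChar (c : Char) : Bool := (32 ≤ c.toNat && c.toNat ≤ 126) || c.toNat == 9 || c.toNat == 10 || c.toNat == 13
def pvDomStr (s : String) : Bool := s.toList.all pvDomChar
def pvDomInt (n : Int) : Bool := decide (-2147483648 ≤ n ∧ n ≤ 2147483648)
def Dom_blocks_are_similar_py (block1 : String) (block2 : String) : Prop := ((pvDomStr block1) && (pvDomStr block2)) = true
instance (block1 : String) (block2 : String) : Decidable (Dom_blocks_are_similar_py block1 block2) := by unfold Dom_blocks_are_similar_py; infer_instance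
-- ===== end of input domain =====

-- B replaces A's loop over the four similarity groups by a precomputed set of all
-- ordered within-group name pairs; the function is one membership test of the pair
-- (alternative formulation: relation lookup instead of group scan; return value only).

-- ===== PORT A =====
-- the literal list of similarity sets from A
def pvSimilarBlocks : List (PySem.Set String) :=
  [PySem.Set.ofList ["owner-information", "applicant-information", "insured-information"],
   PySem.Set.ofList ["beneficiary-information", "recipient-information"],
   PySem.Set.ofList ["contact-information", "address-information"],
   PySem.Set.ofList ["payment", "billing", "premium"]]

-- A's 'for group in similar_blocks: if …: return True' loop
def pvLoopA (block1 block2 : String) : List (PySem.Set String) → Bool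
  | [] => false
  | g :: rest =>
      if PySem.Set.contains g block1 && PySem.Set.contains g block2 then true
      else pvLoopA block1 block2 rest

def blocks_are_similar_py (block1 : String) (block2 : String) : Bool :=
  pvLoopA block1 block2 pvSimilarBlocks

-- ===== PORT B =====
-- B's group tuples (the comprehension's source)
def pvGroupsB : List (List String) :=
  [["owner-information", "applicant-information", "insured-information"],
   ["beneficiary-information", "recipient-information"],
   ["contact-information", "address-information"],
   ["payment", "billing", "premium"]]

-- the precomputed similarity relation: frozenset of all ordered within-group pairs
def pvSimilarPairs : PySem.Set (String × String) :=
  PySem.Set.ofList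
    (pvGroupsB.flatMap (fun g => g.flatMap (fun x => g.map (fun y => (x, y)))))

def blocks_are_similar_py_alt (block1 : String) (block2 : String) : Bool :=
  PySem.Set.contains pvSimilarPairs (block1, block2)

-- ===== PRECONDITION & SPEC =====
def Spec_blocks_are_similar_py (block1 : String) (block2 : String) (out : Bool) : Prop := out = blocks_are_similar_py_alt block1 block2
instance (block1 : String) (block2 : String) (out : Bool) : Decidable (Spec_blocks_are_similar_py block1 block2 out) := by unfold Spec_blocks_are_similar_py; infer_instance

-- ===== CLAIM =====
def Claim_equal_blocks_are_similar_py : Prop := ∀ (block1 : String) (block2 : String), Dom_blocks_are_similar_py block1 block2 → Spec_blocks_are_similar_py block1 block2 (blocks_are_similar_py block1 block2)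

-- ===== LEMMAS AND PROOFS =====
-- generic: A's scan over the groups (as sets) equals membership of the pair in the
-- flattened relation of within-group pairs, for ANY list of groups
theorem pvLoop_eq_pairs (b1 b2 : String) (gs : List (List String)) :
    pvLoopA b1 b2 (gs.map PySem.Set.ofList) =
      ((gs.flatMap (fun g => g.flatMap (fun x => g.map (fun y => (x, y))))).contains (b1, b2)) := by
  induction gs with
  | nil => rfl
  | cons g rest ih =>
      simp only [List.map_cons, List.flatMap_cons, pvLoopA]
      by_cases h : PySem.Set.contains (PySem.Set.ofList g) b1 && PySem.Set.contains (PySem.Set.ofList g) b2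
      · simp only [h, if_true]
        have h1 : b1 ∈ g := by
          have := (Bool.and_eq_true ..).mp h |>.1
          simpa [PySem.Set.contains, PySem.Set.mem_ofList] using this
        have h2 : b2 ∈ g := by
          have := (Bool.and_eq_true ..).mp h |>.2
          simpa [PySem.Set.contains, PySem.Set.mem_ofList] using this
        symm
        simp only [List.contains_eq_mem, decide_eq_true_eq, List.mem_append]
        left
        simp only [List.mem_flatMap, List.mem_map]
        exact ⟨b1, h1, b2, h2, rfl⟩
      · simp only [h, ih]
        have hnot : ¬ ((b1, b2) ∈ g.flatMap (fun x => g.map (fun y => (x, y)))) := by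
          intro hmem
          apply h
          simp only [List.mem_flatMap, List.mem_map] at hmem
          obtain ⟨x, hx, y, hy, hpair⟩ := hmem
          cases hpair
          simp [PySem.Set.contains, PySem.Set.mem_ofList, hx, hy]
        simp [List.contains_eq_mem, hnot]

-- membership in the ofList set equals membership in the underlying list
theorem pvContains_ofList (p : String × String) (l : List (String × String)) :
    PySem.Set.contains (PySem.Set.ofList l) p = l.contains p := by
  simp [PySem.Set.contains, List.contains_eq_mem, PySem.Set.mem_ofList]

theorem pvAgree (b1 b2 : String) :
    blocks_are_similar_py b1 b2 = blocks_are_similar_py_alt b1 b2 := by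
  have hA : pvSimilarBlocks = pvGroupsB.map PySem.Set.ofList := rfl
  unfold blocks_are_similar_py blocks_are_similar_py_alt pvSimilarPairs
  rw [hA, pvLoop_eq_pairs, pvContains_ofList]

-- ===== VERDICT =====
theorem blocks_are_similar_py_spec : Claim_equal_blocks_are_similar_py := by
  intro b1 b2 _
  unfold Spec_blocks_are_similar_py
  exact pvAgree b1 b2
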